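-- pv_equiv track=rewrite | github.com/storm-crypto/kaoyan-2027-coach | scripts/latex_to_unicode.py | _consume_group
-- ===== SOURCE A (Python) =====
-- from typing import List, Match, Tuple
--
-- def _consume_group(text: str, start: int, open_char: str, close_char: str) -> Tuple[str, int]:
--     if start >= len(text) or text[start] != open_char:
--         return "", start
--
--     depth = 1
--     index = start + 1
--     while index < len(text):
--         char = text[index]
--         if char == open_char:
--             depth += 1
--         elif char == close_char:
--             depth -= 1
--             if depth == 0:
--                 return text[start + 1:index], index + 1
--         index += 1
--
--     return text[start + 1:], len(text)
-- ===== SOURCE B (Python) =====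
-- def _consume_group(text, start, open_char, close_char):
--     if start >= len(text) or text[start] != open_char:
--         return "", start
--     index = start + 1
--     while index < len(text):
--         char = text[index]
--         if char == open_char:
--             _, index = _consume_group(text, index, open_char, close_char)
--         elif char == close_char:
--             return text[start + 1:index], index + 1
--         else:
--             index += 1
--     return text[start + 1:], len(text)
-- ===== Notes on version B (the rewrite author's own statement) =====
-- stated objective: alternative
-- what changed: The explicit depth counter is replaced by recursive descent: on a nested open_char the function calls itself to consume the inner group and resumes at the returned index, so no depth integer is maintained.
import Mathlib
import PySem

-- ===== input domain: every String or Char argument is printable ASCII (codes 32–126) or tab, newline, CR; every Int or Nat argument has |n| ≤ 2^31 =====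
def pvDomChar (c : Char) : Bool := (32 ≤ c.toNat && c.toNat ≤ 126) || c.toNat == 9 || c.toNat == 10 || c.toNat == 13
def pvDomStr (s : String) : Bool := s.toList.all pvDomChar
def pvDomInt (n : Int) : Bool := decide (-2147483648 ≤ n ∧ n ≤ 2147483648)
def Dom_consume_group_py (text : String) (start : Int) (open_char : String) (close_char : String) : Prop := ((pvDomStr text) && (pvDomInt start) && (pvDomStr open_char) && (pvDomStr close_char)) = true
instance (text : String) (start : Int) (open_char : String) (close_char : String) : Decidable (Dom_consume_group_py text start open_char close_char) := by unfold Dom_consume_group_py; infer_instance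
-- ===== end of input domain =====

-- B replaces A's explicit depth counter by recursive descent over nested groups (alternative decomposition, same cost).


-- ===== PORT A =====
-- Python's `text[index] == open_char` compares a one-character string with an arbitrary string;
-- `none` (index out of range) can only be reached outside Pre_, where Python raises.
def pvChEq (o : Option Char) (s : String) : Bool :=
  match o with
  | some c => String.ofList [c] == s
  | none => false

-- the `while index < len(text)` loop of A, with its `depth`/`index` state; fuel = number of
-- remaining iterations, exact at the call site (the loop steps `index` by one each turn)
def consume_group_py_loop (text : String) (open_char : String) (close_char : String)
    (start : Int) (fuel : Nat) (depth index : Int) : String × Int :=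
  match fuel with
  | 0 => (PySem.Str.slice text (some (start + 1)) none, PySem.Str.len text)
  | f + 1 =>
    if index < PySem.Str.len text then
      let char := PySem.Str.pyGet? text index
      if pvChEq char open_char then
        consume_group_py_loop text open_char close_char start f (depth + 1) (index + 1)
      else if pvChEq char close_char then
        let d := depth - 1
        if d = 0 then (PySem.Str.slice text (some (start + 1)) (some index), index + 1)
        else consume_group_py_loop text open_char close_char start f d (index + 1)
      else consume_group_py_loop text open_char close_char start f depth (index + 1)
    else (PySem.Str.slice text (some (start + 1)) none, PySem.Str.len text)

def consume_group_py (text : String) (start : Int) (open_char : String) (close_char : String) : String × Int :=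
  if PySem.Str.len text ≤ start ∨ ¬ pvChEq (PySem.Str.pyGet? text start) open_char then ("", start)
  else consume_group_py_loop text open_char close_char start
        (PySem.Str.len text - (start + 1)).toNat 1 (start + 1)

-- ===== PORT B =====
-- recursive descent: `consume_group_py_alt_go` is B's `_consume_group`, `consume_group_py_alt_loop`
-- its `while` loop; on a nested open_char the loop recursively consumes the inner group and resumes
-- at the index that call returns.  fuel bounds the combined loop-steps/recursion depth; the top-level
-- call supplies enough for every input admitted by Pre_.
mutual
def consume_group_py_alt_go (text : String) (open_char : String) (close_char : String)
    (fuel : Nat) (start : Int) : String × Int :=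
  if PySem.Str.len text ≤ start ∨ ¬ pvChEq (PySem.Str.pyGet? text start) open_char then ("", start)
  else consume_group_py_alt_loop text open_char close_char fuel start (start + 1)
termination_by (fuel, 1)

def consume_group_py_alt_loop (text : String) (open_char : String) (close_char : String)
    (fuel : Nat) (start index : Int) : String × Int :=
  match fuel with
  | 0 => (PySem.Str.slice text (some (start + 1)) none, PySem.Str.len text)
  | f + 1 =>
    if index < PySem.Str.len text then
      let char := PySem.Str.pyGet? text index
      if pvChEq char open_char then
        consume_group_py_alt_loop text open_char close_char f start
          (consume_group_py_alt_go text open_char close_char f index).2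
      else if pvChEq char close_char then
        (PySem.Str.slice text (some (start + 1)) (some index), index + 1)
      else consume_group_py_alt_loop text open_char close_char f start (index + 1)
    else (PySem.Str.slice text (some (start + 1)) none, PySem.Str.len text)
termination_by (fuel, 0)
end

def consume_group_py_alt (text : String) (start : Int) (open_char : String) (close_char : String) : String × Int :=
  consume_group_py_alt_go text open_char close_char (4 * (PySem.Str.len text).toNat + 4) start

-- ===== PRECONDITION & SPEC =====
-- Pre_ excludes exactly the inputs where Python A raises IndexError: start < -len(text)
-- (then `text[start]` is out of range; B raises there too).
def Pre_consume_group_py (text : String) (start : Int) (open_char : String) (close_char : String) : Prop :=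
  -(PySem.Str.len text) ≤ start
instance (text : String) (start : Int) (open_char : String) (close_char : String) : Decidable (Pre_consume_group_py text start open_char close_char) := by unfold Pre_consume_group_py; infer_instance

def pvWitness_consume_group_py : String × Int × String × String := ("(a(b))c", 0, "(", ")")

def Spec_consume_group_py (text : String) (start : Int) (open_char : String) (close_char : String) (out : String × Int) : Prop := out = consume_group_py_alt text start open_char close_char
instance (text : String) (start : Int) (open_char : String) (close_char : String) (out : String × Int) : Decidable (Spec_consume_group_py text start open_char close_char out) := by unfold Spec_consume_group_py; infer_instance

-- ===== CLAIM (what is proved, stated in full; the proofs are below) =====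
def Claim_equal_consume_group_py : Prop := ∀ (text : String) (start : Int) (open_char : String) (close_char : String), Dom_consume_group_py text start open_char close_char → Pre_consume_group_py text start open_char close_char → Spec_consume_group_py text start open_char close_char (consume_group_py text start open_char close_char)

-- ===== LEMMAS AND PROOFS =====

-- the index (if any) at which a scan starting at `index` with open-depth `depth` closes:
-- a common characterisation both loops are reduced to
def pvClose (text : String) (open_char : String) (close_char : String) (depth index : Int) : Option Int :=
  if _h : index < PySem.Str.len text then
    if pvChEq (PySem.Str.pyGet? text index) open_char then
      pvClose text open_char close_char (depth + 1) (index + 1)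
    else if pvChEq (PySem.Str.pyGet? text index) close_char then
      if depth - 1 = 0 then some index
      else pvClose text open_char close_char (depth - 1) (index + 1)
    else pvClose text open_char close_char depth (index + 1)
  else none
termination_by (PySem.Str.len text - index).toNat
decreasing_by all_goals omega

lemma pvClose_bound (text open_char close_char : String) :
    ∀ (k : Nat) (depth index j : Int), (PySem.Str.len text - index).toNat ≤ k →
      pvClose text open_char close_char depth index = some j →
      index ≤ j ∧ j < PySem.Str.len text := by
  intro k
  induction k with
  | zero =>
    intro depth index j hk h
    rw [pvClose] at h
    rw [dif_neg (by omega)] at h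
    exact absurd h (by simp)
  | succ k ih =>
    intro depth index j hk h
    rw [pvClose] at h
    by_cases hi : index < PySem.Str.len text
    · rw [dif_pos hi] at h
      split_ifs at h with h1 h2 h3
      · have := ih (depth + 1) (index + 1) j (by omega) h; omega
      · simp at h; omega
      · have := ih (depth - 1) (index + 1) j (by omega) h; omega
      · have := ih depth (index + 1) j (by omega) h; omega
    · rw [dif_neg hi] at h
      exact absurd h (by simp)

lemma consume_group_py_loop_eq (text open_char close_char : String) (start : Int) :
    ∀ (fuel : Nat) (depth index : Int), (PySem.Str.len text - index).toNat ≤ fuel →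
      consume_group_py_loop text open_char close_char start fuel depth index =
        match pvClose text open_char close_char depth index with
        | some j => (PySem.Str.slice text (some (start + 1)) (some j), j + 1)
        | none => (PySem.Str.slice text (some (start + 1)) none, PySem.Str.len text) := by
  intro fuel
  induction fuel with
  | zero =>
    intro depth index hk
    rw [pvClose, dif_neg (by omega)]
    rfl
  | succ f ih =>
    intro depth index hk
    rw [pvClose]
    by_cases hi : index < PySem.Str.len text
    · rw [dif_pos hi]
      simp only [consume_group_py_loop, if_pos hi]
      split_ifs with h1 h2 h3
      · exact ih (depth + 1) (index + 1) (by omega)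
      · rfl
      · exact ih (depth - 1) (index + 1) (by omega)
      · exact ih depth (index + 1) (by omega)
    · rw [dif_neg hi]
      simp only [consume_group_py_loop, if_neg hi]

lemma pvClose_skip (text open_char close_char : String) :
    ∀ (k : Nat) (depth index : Int), (PySem.Str.len text - index).toNat ≤ k → 1 ≤ depth →
      pvClose text open_char close_char (depth + 1) index =
        match pvClose text open_char close_char 1 index with
        | some j => pvClose text open_char close_char depth (j + 1)
        | none => none := by
  intro k
  induction k with
  | zero =>
    intro depth index hk hd
    rw [pvClose, dif_neg (by omega)]
    rw [pvClose, dif_neg (by omega)]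
  | succ k ih =>
    intro depth index hk hd
    by_cases hi : index < PySem.Str.len text
    · by_cases h1 : pvChEq (PySem.Str.pyGet? text index) open_char = true
      · -- open: recurse one level deeper
        rw [pvClose, dif_pos hi, if_pos h1]
        conv_rhs => rw [pvClose, dif_pos hi, if_pos h1]
        rw [ih (depth + 1) (index + 1) (by omega) (by omega)]
        rw [ih 1 (index + 1) (by omega) (by omega)]
        cases hj : pvClose text open_char close_char 1 (index + 1) with
        | none => simp
        | some j =>
          have hb := pvClose_bound text open_char close_char
            ((PySem.Str.len text - (index + 1)).toNat) 1 (index + 1) j (by omega) hj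
          simp only
          exact ih depth (j + 1) (by omega) hd
      · by_cases h2 : pvChEq (PySem.Str.pyGet? text index) close_char = true
        · -- close at this index
          rw [pvClose, dif_pos hi, if_neg h1, if_pos h2, if_neg (show ¬(depth + 1 - 1 = 0) by omega)]
          conv_rhs => rw [pvClose, dif_pos hi, if_neg h1, if_pos h2,
            if_pos (show (1 : Int) - 1 = 0 by norm_num)]
          simp only
          congr 1
          omega
        · -- other character
          rw [pvClose, dif_pos hi, if_neg h1, if_neg h2]
          conv_rhs => rw [pvClose, dif_pos hi, if_neg h1, if_neg h2]
          exact ih depth (index + 1) (by omega) hd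
    · rw [pvClose, dif_neg hi]
      rw [pvClose, dif_neg hi]

lemma consume_group_py_alt_loop_eq (text open_char close_char : String) :
    ∀ (fuel : Nat) (start index : Int), 2 * (PySem.Str.len text - index).toNat + 1 ≤ fuel →
      consume_group_py_alt_loop text open_char close_char fuel start index =
        match pvClose text open_char close_char 1 index with
        | some j => (PySem.Str.slice text (some (start + 1)) (some j), j + 1)
        | none => (PySem.Str.slice text (some (start + 1)) none, PySem.Str.len text) := by
  intro fuel
  induction fuel with
  | zero => intro start index hk; omega
  | succ f ih =>
    intro start index hk
    by_cases hi : index < PySem.Str.len text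
    · by_cases h1 : pvChEq (PySem.Str.pyGet? text index) open_char = true
      · -- open: B recursively consumes the inner group and resumes at the returned index
        have hgo : consume_group_py_alt_go text open_char close_char f index =
            consume_group_py_alt_loop text open_char close_char f index (index + 1) := by
          rw [consume_group_py_alt_go, if_neg (by push_neg; exact ⟨hi, h1⟩)]
        rw [pvClose, dif_pos hi, if_pos h1]
        simp only [consume_group_py_alt_loop, if_pos hi, if_pos h1]
        rw [hgo, ih index (index + 1) (by omega)]
        rw [pvClose_skip text open_char close_char
          ((PySem.Str.len text - (index + 1)).toNat) 1 (index + 1) (by omega) le_rfl]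
        cases hj : pvClose text open_char close_char 1 (index + 1) with
        | none =>
          simp only
          rw [ih start (PySem.Str.len text) (by omega)]
          rw [pvClose, dif_neg (by omega)]
        | some j =>
          have hb := pvClose_bound text open_char close_char
            ((PySem.Str.len text - (index + 1)).toNat) 1 (index + 1) j (by omega) hj
          simp only
          exact ih start (j + 1) (by omega)
      · by_cases h2 : pvChEq (PySem.Str.pyGet? text index) close_char = true
        · -- close: B returns here, and so does the depth-1 scan
          rw [pvClose, dif_pos hi, if_neg h1, if_pos h2,
            if_pos (show (1 : Int) - 1 = 0 by norm_num)]
          simp only [consume_group_py_alt_loop, if_pos hi, if_neg h1, if_pos h2]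
        · rw [pvClose, dif_pos hi, if_neg h1, if_neg h2]
          simp only [consume_group_py_alt_loop, if_pos hi, if_neg h1, if_neg h2]
          exact ih start (index + 1) (by omega)
    · rw [pvClose, dif_neg hi]
      simp only [consume_group_py_alt_loop, if_neg hi]

-- ===== VERDICT (by name: the statement is the Claim_ definition above) =====
theorem consume_group_py_spec : Claim_equal_consume_group_py := by
  intro text start open_char close_char _hdom hpre
  unfold Spec_consume_group_py
  unfold consume_group_py consume_group_py_alt
  rw [consume_group_py_alt_go]
  by_cases hg : PySem.Str.len text ≤ start ∨ ¬ pvChEq (PySem.Str.pyGet? text start) open_char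
  · rw [if_pos hg, if_pos hg]
  · rw [if_neg hg, if_neg hg]
    have hlen : (0 : Int) ≤ PySem.Str.len text := by
      rw [PySem.Str.len_eq]; positivity
    have hpre' : -(PySem.Str.len text) ≤ start := hpre
    push_neg at hg
    rw [consume_group_py_loop_eq text open_char close_char start _ 1 (start + 1) le_rfl]
    rw [consume_group_py_alt_loop_eq text open_char close_char _ start (start + 1) (by omega)]
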